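-- pv_equiv track=rewrite | github.com/camilleemig/CSE231 | Honors Option/honors2test.py | move_tiles
-- ===== SOURCE A (Python) =====
-- def move_tiles(move, board):
--     """
--     Changes values in the board based on which spot was choosen
--     move: the spot from which to move the seeds
--     board: a list containing the current values of the board
--     returns: the current board as a list, the moves played in this turn as
--              a list
--     """
--     move_again = False
--     capture = False
--     #set the number of seeds to move
--     number_of_tiles = board[move]
--     #A counter to count the current position on the board
--     i = 1
--     #Sets the spot chosen to 0
--     board[move] = 0
--     #Keeps track of what the original spot was
--     original_move = move
--
--     while number_of_tiles > 0:
--         board[move + i] += 1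
--         i += 1
--         number_of_tiles -= 1
--
--         #Checks to see if it is random's turn and there is another move
--         if number_of_tiles == 0 and original_move < int(len(board)/2 -1)\
--         and (move + i - 1) == int(len(board)/2 - 1):
--             move_again = True
--         #Checks to see if it is strategy's turn and there is another move
--         elif number_of_tiles == 0 and original_move > int(len(board)/2 -1)\
--         and (move + i - 1) == len(board) - 1:
--             move_again = True
--
--         #Checks to see if tiles need to be moved from the opposite
--         #side of the board and moves them
--         elif number_of_tiles == 0 and board[move + i - 1] == 1:
--             if (original_move > int(len(board)/2 -1) and (move + i - 1) >\
--             int(len(board)/2 -1)) or\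
--             (original_move < int(len(board)/2 -1) and (move + i - 1) < \
--             int(len(board)/2 -1)):
--                 to_move = board[len(board) - 1 -(move + i)]
--                 board[move + i - 1] += to_move
--                 board[len(board) - 1 -(move + i)] = 0
--                 capture = True
--
--         #Keeps the counter within values in the list
--         if move + i > (len(board) - 1):
--             move = 0
--             i = 0
--
--     #Returns the current board and any extra moves played
--     return board, move_again, capture
-- ===== SOURCE B (Python) =====
-- def move_tiles(move, board):
--     """Same result as A, computed in O(len(board)) instead of O(number of seeds):
--     full laps become one bulk increment, the remainder is a single window, and the
--     landing square is the closed form (move + seeds) % n.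
--     Note: A mutates `board` fully in place; B only zeroes board[move] and returns a
--     fresh list — the equivalence claimed is about the RETURN value."""
--     seeds = board[move]
--     board[move] = 0
--     if seeds <= 0:
--         return board, False, False
--     n = len(board)
--     q, r = divmod(seeds, n)
--     out = [x + q for x in board]
--     for j in range(r):
--         out[(move + 1 + j) % n] += 1
--     p = (move + seeds) % n
--     half = n // 2 - 1
--     move_again = False
--     capture = False
--     if move < half and p == half:
--         move_again = True
--     elif move > half and p == n - 1:
--         move_again = True
--     elif out[p] == 1 and ((move > half and p > half) or (move < half and p < half)):
--         out[p] += out[n - 2 - p]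
--         out[n - 2 - p] = 0
--         capture = True
--     return out, move_again, capture
-- ===== Notes on version B (the rewrite author's own statement) =====
-- stated objective: faster
-- what changed: A sows the seeds one at a time in a while-loop (O(board[move]) iterations with wrap-around state); B computes full laps as one divmod bulk increment, adds the remainder as a single window of +1s, and derives the landing square in closed form as (move+seeds)%n.
-- outside the precondition, e.g. on move_tiles(-3, [0, 2, 0, 0]): A returns ([0, 0, 1, 0], False, True), B returns ([0, 0, 1, 1], False, False)
import Mathlib
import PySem

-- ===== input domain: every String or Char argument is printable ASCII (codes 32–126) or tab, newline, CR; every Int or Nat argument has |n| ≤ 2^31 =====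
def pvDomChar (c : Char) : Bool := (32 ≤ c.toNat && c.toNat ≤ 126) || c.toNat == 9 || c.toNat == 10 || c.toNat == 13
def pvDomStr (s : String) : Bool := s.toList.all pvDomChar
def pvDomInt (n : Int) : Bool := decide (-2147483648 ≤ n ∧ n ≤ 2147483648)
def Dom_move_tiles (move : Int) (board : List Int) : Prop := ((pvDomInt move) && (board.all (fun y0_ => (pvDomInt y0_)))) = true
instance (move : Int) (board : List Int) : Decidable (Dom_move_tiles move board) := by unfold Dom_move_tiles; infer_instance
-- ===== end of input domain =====

-- B replaces A's seed-by-seed sowing loop by a divmod bulk increment, one remainder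
-- window and a closed-form landing square (objective: faster). A mutates `board` fully
-- in place while B only zeroes board[move]; the equivalence is about the RETURN value.

-- ===== PORT A =====
-- exact value of Python's int(len(board)/2 - 1) (true division then truncation) for any
-- realizable list length (float rounding is exact for lengths < 2^52)
def pyHalfLen (n : Nat) : Int := ((n : Int) - 2).tdiv 2

-- the while-loop of A; board indexing via pyGetD/pySetD (exact: every index the loop
-- reaches under Pre_ is in range, cf. the invariant in the proofs below)
def moveTilesLoop (board : List Int) (move i number_of_tiles original_move : Int)
    (move_again capture : Bool) : List Int × Bool × Bool :=
  if h : 0 < number_of_tiles then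
    let n : Int := board.length
    let half : Int := pyHalfLen board.length
    let board1 := PySem.List.pySetD board (move + i) (PySem.List.pyGetD board (move + i) 0 + 1)
    let i1 := i + 1
    let t1 := number_of_tiles - 1
    -- the if/elif chain of the loop body (state after it: move_again, board, capture)
    let st : Bool × List Int × Bool :=
      if t1 = 0 ∧ original_move < half ∧ move + i1 - 1 = half then
        (true, board1, capture)
      else if t1 = 0 ∧ original_move > half ∧ move + i1 - 1 = n - 1 then
        (true, board1, capture)
      else if t1 = 0 ∧ PySem.List.pyGetD board1 (move + i1 - 1) 0 = 1 then
        if (original_move > half ∧ move + i1 - 1 > half) ∨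
           (original_move < half ∧ move + i1 - 1 < half) then
          let to_move := PySem.List.pyGetD board1 (n - 1 - (move + i1)) 0
          let board2 := PySem.List.pySetD board1 (move + i1 - 1)
            (PySem.List.pyGetD board1 (move + i1 - 1) 0 + to_move)
          let board3 := PySem.List.pySetD board2 (n - 1 - (move + i1)) 0
          (move_again, board3, true)
        else (move_again, board1, capture)
      else (move_again, board1, capture)
    -- 'keeps the counter within values in the list'
    let mi : Int × Int := if move + i1 > n - 1 then ((0 : Int), (0 : Int)) else (move, i1)
    moveTilesLoop st.2.1 mi.1 mi.2 t1 original_move st.1 st.2.2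
  else (board, move_again, capture)
termination_by number_of_tiles.toNat
decreasing_by omega

def move_tiles (move : Int) (board : List Int) : List Int × Bool × Bool :=
  match PySem.List.pyGet? board move with
  | none => (board, false, false)      -- board[move] raises IndexError; outside Pre_
  | some number_of_tiles =>
      let board := PySem.List.pySetD board move 0
      moveTilesLoop board move 1 number_of_tiles move false false

-- ===== PORT B =====
def move_tiles_alt (move : Int) (board : List Int) : List Int × Bool × Bool :=
  match PySem.List.pyGet? board move with
  | none => (board, false, false)      -- board[move] raises IndexError; outside Pre_
  | some seeds =>
      let board := PySem.List.pySetD board move 0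
      if seeds ≤ 0 then (board, false, false)
      else
        let n : Int := board.length
        let q := PySem.Int.floordiv seeds n
        let r := PySem.Int.mod seeds n
        let out0 := board.map (fun x => x + q)
        let out := (PySem.List.pyRange 0 r 1).foldl
          (fun o j => PySem.List.pySetD o (PySem.Int.mod (move + 1 + j) n)
            (PySem.List.pyGetD o (PySem.Int.mod (move + 1 + j) n) 0 + 1)) out0
        let p := PySem.Int.mod (move + seeds) n
        let half := PySem.Int.floordiv n 2 - 1
        if move < half ∧ p = half then (out, true, false)
        else if move > half ∧ p = n - 1 then (out, true, false)
        else if PySem.List.pyGetD out p 0 = 1 ∧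
            ((move > half ∧ p > half) ∨ (move < half ∧ p < half)) then
          let out2 := PySem.List.pySetD out p
            (PySem.List.pyGetD out p 0 + PySem.List.pyGetD out (n - 2 - p) 0)
          let out3 := PySem.List.pySetD out2 (n - 2 - p) 0
          (out3, false, true)
        else (out, false, false)

-- ===== PRECONDITION & SPEC =====
-- Pre_ restricts to the natural domain of the game: a non-negative in-range pit index.
-- It excludes negative `move` (Python wraparound: A sows correctly there but compares the
-- raw negative position in its bonus/capture tests — and can even raise on some of them),
-- and excludes move = len(board)-1 with seeds > 0, where A raises IndexError.
def Pre_move_tiles (move : Int) (board : List Int) : Prop :=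
  0 ≤ move ∧ move < board.length ∧
    (move + 1 < board.length ∨ board.getD move.toNat 0 ≤ 0)
instance (move : Int) (board : List Int) : Decidable (Pre_move_tiles move board) := by
  unfold Pre_move_tiles; infer_instance
def pvWitness_move_tiles : Int × List Int := (1, [4, 3, 1, 0, 2, 7])

def Spec_move_tiles (move : Int) (board : List Int) (out : List Int × Bool × Bool) : Prop := out = move_tiles_alt move board
instance (move : Int) (board : List Int) (out : List Int × Bool × Bool) : Decidable (Spec_move_tiles move board out) := by unfold Spec_move_tiles; infer_instance

-- ===== CLAIM (what is proved, stated in full; the proofs are below) =====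
def Claim_equal_move_tiles : Prop := ∀ (move : Int) (board : List Int), Dom_move_tiles move board → Pre_move_tiles move board → Spec_move_tiles move board (move_tiles move board)

-- ===== LEMMAS AND PROOFS =====

-- one seed dropped into pit s
def incAt (b : List Int) (s : Nat) : List Int := b.set s (b.getD s 0 + 1)

-- k seeds sown one at a time, cyclically, starting at pit s
def sowSpec : List Int → Nat → Nat → List Int
  | b, _, 0 => b
  | b, s, k + 1 => sowSpec (incAt b s) (if s + 1 = b.length then 0 else s + 1) k

-- the end-of-turn bookkeeping both programs perform on the sown board b, landing pit p
def finalize (b : List Int) (p : Nat) (orig half : Int) : List Int × Bool × Bool :=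
  let n : Int := b.length
  if orig < half ∧ (p : Int) = half then (b, true, false)
  else if orig > half ∧ (p : Int) = n - 1 then (b, true, false)
  else if PySem.List.pyGetD b (p : Int) 0 = 1 ∧
      ((orig > half ∧ (p : Int) > half) ∨ (orig < half ∧ (p : Int) < half)) then
    let b2 := PySem.List.pySetD b (p : Int)
      (PySem.List.pyGetD b (p : Int) 0 + PySem.List.pyGetD b (n - 2 - (p : Int)) 0)
    let b3 := PySem.List.pySetD b2 (n - 2 - (p : Int)) 0
    (b3, false, true)
  else (b, false, false)

theorem incAt_length (b : List Int) (s : Nat) : (incAt b s).length = b.length := by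
  simp [incAt]

theorem getD_set_eq (b : List Int) (s j : Nat) (v : Int) (hs : s < b.length) :
    (b.set s v).getD j 0 = if j = s then v else b.getD j 0 := by
  by_cases h : j = s
  · subst h; simp [List.getD_eq_getElem?_getD, hs]
  · rw [List.getD_eq_getElem?_getD, List.getElem?_set, if_neg (fun hh => h hh.symm),
      if_neg h, List.getD_eq_getElem?_getD]

theorem window_lemma : ∀ (k : Nat) (b : List Int) (s j : Nat),
    s < b.length → j < b.length → k ≤ b.length →
    (sowSpec b s k).getD j 0 =
      b.getD j 0 + (if (if s ≤ j then j - s else j + b.length - s) < k then 1 else 0)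
  | 0, b, s, j, hs, hj, hk => by simp [sowSpec]
  | k+1, b, s, j, hs, hj, hk => by
    have hlen : (incAt b s).length = b.length := incAt_length b s
    by_cases hw : s + 1 = b.length
    · rw [sowSpec, if_pos hw,
        window_lemma k (incAt b s) 0 j (by omega) (by omega) (by omega)]
      simp only [incAt, List.length_set, getD_set_eq b s j _ hs]
      rcases eq_or_ne j s with hjs | hjs
      · subst hjs; split_ifs <;> omega
      · simp only [if_neg hjs]; split_ifs <;> omega
    · rw [sowSpec, if_neg hw,
        window_lemma k (incAt b s) (s + 1) j (by omega) (by omega) (by omega)]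
      simp only [incAt, List.length_set, getD_set_eq b s j _ hs]
      rcases eq_or_ne j s with hjs | hjs
      · subst hjs; split_ifs <;> omega
      · simp only [if_neg hjs]; split_ifs <;> omega

theorem sowSpec_length (k : Nat) : ∀ (b : List Int) (s : Nat),
    (sowSpec b s k).length = b.length := by
  induction k with
  | zero => intro b s; rfl
  | succ k ih => intro b s; rw [sowSpec, ih, incAt_length]

theorem lap_lemma (b : List Int) (s : Nat) (hs : s < b.length) :
    sowSpec b s b.length = b.map (fun x => x + 1) := by
  apply List.ext_getElem (by simp [sowSpec_length])
  intro j h1 h2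
  have hj : j < b.length := by simpa [sowSpec_length] using h1
  have hw := window_lemma b.length b s j hs hj le_rfl
  rw [List.getD_eq_getElem _ _ h1, List.getD_eq_getElem _ _ hj] at hw
  rw [hw, List.getElem_map]
  split_ifs <;> omega

theorem sowSpec_split : ∀ (a m : Nat) (b : List Int) (s : Nat), s < b.length →
    sowSpec b s (a + m) = sowSpec (sowSpec b s a) ((s + a) % b.length) m
  | 0, m, b, s, hs => by simp [sowSpec, Nat.mod_eq_of_lt hs]
  | a + 1, m, b, s, hs => by
    have hlen : (incAt b s).length = b.length := incAt_length b s
    rw [show a + 1 + m = (a + m) + 1 from by omega, sowSpec,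
      show sowSpec b s (a + 1) = sowSpec (incAt b s) (if s + 1 = b.length then 0 else s + 1) a
        from by rw [sowSpec]]
    by_cases hw : s + 1 = b.length
    · rw [if_pos hw, sowSpec_split a m (incAt b s) 0 (by omega),
        show s + (a + 1) = a + b.length from by omega, Nat.add_mod_right, hlen, Nat.zero_add]
    · rw [if_neg hw, sowSpec_split a m (incAt b s) (s + 1) (by omega), hlen,
        show s + 1 + a = s + (a + 1) from by omega]

theorem laps_lemma : ∀ (q r : Nat) (b : List Int) (s : Nat), s < b.length →
    sowSpec b s (b.length * q + r) = sowSpec (b.map (fun x => x + (q : Int))) s r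
  | 0, r, b, s, hs => by simp
  | q + 1, r, b, s, hs => by
    rw [show b.length * (q + 1) + r = b.length + (b.length * q + r) from by ring,
      sowSpec_split b.length (b.length * q + r) b s hs, lap_lemma b s hs,
      Nat.add_mod_right, Nat.mod_eq_of_lt hs]
    have hlen : (b.map (fun x => x + (1 : Int))).length = b.length := by simp
    have ih := laps_lemma q r (b.map (fun x => x + (1 : Int))) s (by simpa)
    rw [hlen] at ih
    rw [ih, List.map_map]
    have hfun : ((fun x => x + (q : Int)) ∘ fun x => x + 1) = (fun x => x + (((q + 1 : Nat)) : Int)) := by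
      funext x
      simp only [Function.comp_apply]
      push_cast
      ring
    rw [hfun]

theorem foldl_sow : ∀ (m : Nat) (b : List Int) (s : Nat) (c a nI : Int),
    2 ≤ b.length → s < b.length → nI = (b.length : Int) →
    PySem.Int.mod (c + a) nI = (s : Int) →
    (PySem.List.pyRange a (a + (m : Int)) 1).foldl
      (fun o j => PySem.List.pySetD o (PySem.Int.mod (c + j) nI)
        (PySem.List.pyGetD o (PySem.Int.mod (c + j) nI) 0 + 1)) b
      = sowSpec b s m
  | 0, b, s, c, a, nI, hb, hs, hn, hmod => by
    rw [show a + ((0 : Nat) : Int) = a from by simp, PySem.List.pyRange_one_eq_nil le_rfl]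
    rfl
  | m + 1, b, s, c, a, nI, hb, hs, hn, hmod => by
    have hpos : (0 : Int) < nI := by rw [hn]; exact_mod_cast Nat.pos_of_ne_zero (by omega)
    rw [PySem.List.pyRange_one_cons (by push_cast; omega), List.foldl_cons, hmod]
    have hset : PySem.List.pySetD b (s : Int) (PySem.List.pyGetD b (s : Int) 0 + 1)
        = incAt b s := by
      simp [incAt, PySem.List.pySetD_natCast, PySem.List.pyGetD_natCast]
    rw [hset]
    have hmod' : PySem.Int.mod (c + (a + 1)) nI
        = ((if s + 1 = b.length then 0 else s + 1 : Nat) : Int) := by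
      rw [PySem.Int.mod_eq_emod_of_pos hpos]
      rw [PySem.Int.mod_eq_emod_of_pos hpos] at hmod
      have h1 : c + (a + 1) = (c + a) + 1 := by ring
      rw [h1, Int.add_emod, hmod]
      have hn2 : (2 : Int) ≤ nI := by rw [hn]; exact_mod_cast hb
      rw [show (1 : Int) % nI = 1 from Int.emod_eq_of_lt (by omega) (by omega)]
      by_cases hw : s + 1 = b.length
      · rw [if_pos hw]
        have : ((s : Int) + 1) = nI := by rw [hn]; exact_mod_cast congrArg (Nat.cast (R := Int)) hw
        rw [this, Int.emod_self]
        rfl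
      · rw [if_neg hw]
        rw [Int.emod_eq_of_lt (by omega) (by rw [hn]; exact_mod_cast by omega)]
        push_cast
        ring
    have ihx := foldl_sow m (incAt b s) (if s + 1 = b.length then 0 else s + 1) c (a + 1) nI
      (by rw [incAt_length]; omega) (by rw [incAt_length]; split <;> omega)
      (by rw [incAt_length]; exact hn) hmod'
    rw [show a + (((m + 1 : Nat)) : Int) = a + 1 + (m : Int) from by push_cast; ring]
    rw [ihx, sowSpec]


theorem loop_zero (b : List Int) (move i orig : Int) (ma cap : Bool) :
    moveTilesLoop b move i 0 orig ma cap = (b, ma, cap) := by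
  rw [moveTilesLoop]
  norm_num

theorem loop_eq : ∀ (k : Nat) (b : List Int) (s : Nat) (move i orig : Int),
    1 ≤ k → 2 ≤ b.length → s < b.length → move + i = (s : Int) →
    moveTilesLoop b move i (k : Int) orig false false =
      finalize (sowSpec b s k) ((s + k - 1) % b.length) orig (pyHalfLen b.length)
  | 0, _, _, _, _, _, h1, _, _, _ => absurd h1 (by omega)
  | 1, b, s, move, i, orig, _, hb, hs, hmi => by
    have hset : PySem.List.pySetD b (move + i) (PySem.List.pyGetD b (move + i) 0 + 1)
        = incAt b s := by
      rw [hmi]; simp [incAt]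
    have e1 : move + (i + 1) - 1 = ((s : Nat) : Int) := by omega
    have e3 : ((b.length : Nat) : Int) - 1 - (move + (i + 1))
        = ((b.length : Nat) : Int) - 2 - ((s : Nat) : Int) := by omega
    rw [moveTilesLoop, dif_pos (show (0 : Int) < ((1 : Nat) : Int) from by norm_num)]
    simp only [hset, e1, e3, Nat.cast_one, sub_self, true_and]
    rw [loop_zero]
    rw [show sowSpec b s 1 = incAt b s from rfl, Nat.add_sub_cancel, Nat.mod_eq_of_lt hs]
    simp only [finalize, incAt_length]
    split_ifs <;> first | rfl | tauto
  | (k + 2), b, s, move, i, orig, _, hb, hs, hmi => by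
    have hset : PySem.List.pySetD b (move + i) (PySem.List.pyGetD b (move + i) 0 + 1)
        = incAt b s := by
      rw [hmi]; simp [incAt]
    have hpos : (0 : Int) < (((k + 2 : Nat)) : Int) := by push_cast; omega
    have ht : (((k + 2 : Nat)) : Int) - 1 = (((k + 1 : Nat)) : Int) := by push_cast; ring
    have htne : ¬ (((k + 1 : Nat)) : Int) = 0 := by push_cast; omega
    rw [moveTilesLoop, dif_pos hpos]
    simp only [hset, ht]
    rw [if_neg (fun h => htne h.1), if_neg (fun h => htne h.1), if_neg (fun h => htne h.1)]
    by_cases hw : s + 1 = b.length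
    · rw [if_pos (show move + (i + 1) > ((b.length : Nat) : Int) - 1 from by
        rw [← hw]; push_cast; omega)]
      have ih := loop_eq (k + 1) (incAt b s) 0 0 0 orig (by omega)
        (by rw [incAt_length]; omega) (by rw [incAt_length]; omega) (by simp)
      simp only [incAt_length] at ih
      rw [show ((0 : Int), (0 : Int)).1 = (0 : Int) from rfl]
      rw [show ((0 : Int), (0 : Int)).2 = (0 : Int) from rfl]
      rw [show ((false : Bool), incAt b s, (false : Bool)).2.1 = incAt b s from rfl]
      rw [show ((false : Bool), incAt b s, (false : Bool)).1 = false from rfl]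
      rw [show ((false : Bool), incAt b s, (false : Bool)).2.2 = false from rfl]
      rw [show 0 + (k + 1) - 1 = k from by omega] at ih
      conv_rhs => rw [sowSpec]
      rw [if_pos hw, show s + (k + 2) - 1 = k + b.length from by omega, Nat.add_mod_right, ih]
    · rw [if_neg (show ¬ move + (i + 1) > ((b.length : Nat) : Int) - 1 from by omega)]
      have ih := loop_eq (k + 1) (incAt b s) (s + 1) move (i + 1) orig (by omega)
        (by rw [incAt_length]; omega) (by rw [incAt_length]; omega) (by push_cast; omega)
      simp only [incAt_length] at ih
      rw [show (move, i + 1).1 = move from rfl, show (move, i + 1).2 = i + 1 from rfl]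
      rw [show ((false : Bool), incAt b s, (false : Bool)).2.1 = incAt b s from rfl]
      rw [show ((false : Bool), incAt b s, (false : Bool)).1 = false from rfl]
      rw [show ((false : Bool), incAt b s, (false : Bool)).2.2 = false from rfl]
      rw [show s + 1 + (k + 1) - 1 = s + (k + 2) - 1 from by omega] at ih
      conv_rhs => rw [sowSpec]
      rw [if_neg hw, ih]

theorem half_eq (n : Nat) (hn : 2 ≤ n) :
    pyHalfLen n = PySem.Int.floordiv (n : Int) 2 - 1 := by
  rw [pyHalfLen, PySem.Int.floordiv_eq_ediv_of_pos (by norm_num),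
    Int.tdiv_eq_ediv_of_nonneg (show (0 : Int) ≤ (n : Int) - 2 from by
      have : (2 : Int) ≤ (n : Int) := by exact_mod_cast hn
      omega)]
  omega

-- ===== VERDICT (by name: the statement is the Claim_ definition above) =====
theorem move_tiles_spec : Claim_equal_move_tiles := by
  intro move board hdom hpre
  obtain ⟨h0, h1, h2⟩ := hpre
  show move_tiles move board = move_tiles_alt move board
  have hmn : move = ((move.toNat : Nat) : Int) := (Int.toNat_of_nonneg h0).symm
  have hlt : move.toNat < board.length := by omega
  have hget : PySem.List.pyGet? board move = some board[move.toNat] :=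
    PySem.List.pyGet?_eq_some_getElem board h0 h1
  have hbz : PySem.List.pySetD board move 0 = board.set move.toNat 0 :=
    PySem.List.pySetD_of_nonneg board 0 h0
  rw [move_tiles, move_tiles_alt, hget]
  simp only [hbz]
  by_cases hsle : board[move.toNat] ≤ 0
  · -- no seeds to sow: the loop body never runs, B takes its early return
    rw [if_pos hsle, moveTilesLoop, dif_neg (by omega)]
  · rw [if_neg hsle]
    have h2' : move + 1 < (board.length : Int) := by
      rcases h2 with h | h
      · exact h
      · exfalso; rw [List.getD_eq_getElem _ _ hlt] at h; omega
    have hb2 : 2 ≤ board.length := by omega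
    have hk : board[move.toNat] = ((board[move.toNat].toNat : Nat) : Int) :=
      (Int.toNat_of_nonneg (by omega)).symm
    rw [hk]
    have hk1 : 1 ≤ board[move.toNat].toNat := by omega
    have hs0 : move.toNat + 1 < board.length := by omega
    have hlenbz : (board.set move.toNat 0).length = board.length := List.length_set ..
    -- A: characterize the sowing loop
    rw [loop_eq board[move.toNat].toNat (board.set move.toNat 0) (move.toNat + 1) move 1 move
      hk1 (by omega) (by omega) (by push_cast; omega)]
    simp only [hlenbz]
    -- B: bulk increment + remainder window is the same sown board
    rw [PySem.Int.floordiv_natCast, PySem.Int.mod_natCast]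
    rw [show ((board[move.toNat].toNat % board.length : Nat) : Int)
        = 0 + ((board[move.toNat].toNat % board.length : Nat) : Int) from by ring]
    rw [foldl_sow (board[move.toNat].toNat % board.length)
      ((board.set move.toNat 0).map (fun x => x + ((board[move.toNat].toNat / board.length : Nat) : Int)))
      (move.toNat + 1) (move + 1) 0 ((board.length : Nat) : Int)
      (by simpa [hlenbz] using hb2) (by simp only [List.length_map, hlenbz]; omega) (by simp [List.length_map, hlenbz])
      (by rw [add_zero, PySem.Int.mod_eq_emod_of_pos (by exact_mod_cast by omega),
        Int.emod_eq_of_lt (by omega) (by exact_mod_cast by omega)]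
          ; push_cast; omega)]
    -- the two sown boards coincide
    have hl := laps_lemma (board[move.toNat].toNat / board.length)
      (board[move.toNat].toNat % board.length) (board.set move.toNat 0) (move.toNat + 1)
      (by omega)
    rw [hlenbz, Nat.div_add_mod] at hl
    rw [hl]
    -- the landing squares coincide
    have hp : PySem.Int.mod (move + ((board[move.toNat].toNat : Nat) : Int))
          ((board.length : Nat) : Int)
        = (((move.toNat + 1 + board[move.toNat].toNat - 1) % board.length : Nat) : Int) := by
      rw [show move + ((board[move.toNat].toNat : Nat) : Int)
          = ((move.toNat + board[move.toNat].toNat : Nat) : Int) from by push_cast; omega,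
        PySem.Int.mod_natCast]
      congr 2
      omega
    rw [hp]
    -- the halves coincide
    rw [← half_eq board.length hb2]
    -- both ends are now the same finalize
    simp only [finalize, sowSpec_length, List.length_map, List.length_set]
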